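-- pv_equiv track=rewrite | github.com/brianjp93/aoc2015 | day08/day8.py | convert
-- ===== SOURCE A (Python) =====
-- def convert(s):
--     out = []
--     i = 0
--     while i < len(s):
--         ch = s[i]
--         if ch == "\\":
--             if s[i + 1] == "x":
--                 out.append("-")
--                 i += 4
--             else:
--                 out.append(s[i + 1])
--                 i += 2
--         else:
--             i += 1
--             out.append(ch)
--     return "".join(out)
-- ===== SOURCE B (Python) =====
-- def convert(s):
--     # Different decomposition: jump between backslashes with str.find and copy
--     # whole unescaped runs by slicing, instead of A's char-by-char scan.
--     parts = []
--     rest = s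
--     while True:
--         j = rest.find("\\")
--         if j == -1:
--             parts.append(rest)
--             break
--         parts.append(rest[:j])
--         c = rest[j + 1]
--         if c == "x":
--             parts.append("-")
--             rest = rest[j + 4:]
--         else:
--             parts.append(c)
--             rest = rest[j + 2:]
--     return "".join(parts)
-- ===== Notes on version B (the rewrite author's own statement) =====
-- stated objective: faster
-- what changed: B replaces A's char-by-char scan (one Python-level iteration and append per character) by a find-next-backslash loop that copies each whole unescaped run with one C-level str.find and one slice; Pre_ excludes exactly the strings with a dangling final backslash, on which both A and B raise IndexError.
import Mathlib
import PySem

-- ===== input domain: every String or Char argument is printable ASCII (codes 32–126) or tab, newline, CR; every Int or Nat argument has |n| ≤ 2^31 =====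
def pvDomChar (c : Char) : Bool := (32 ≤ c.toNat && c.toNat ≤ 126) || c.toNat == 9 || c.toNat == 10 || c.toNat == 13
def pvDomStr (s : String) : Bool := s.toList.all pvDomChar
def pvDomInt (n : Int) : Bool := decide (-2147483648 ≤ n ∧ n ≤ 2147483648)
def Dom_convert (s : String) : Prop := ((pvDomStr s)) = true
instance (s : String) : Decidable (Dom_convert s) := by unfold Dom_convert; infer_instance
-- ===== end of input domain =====

-- B copies whole unescaped runs between backslashes found by str.find, instead of A's
-- char-by-char scan (a constant-factor change); equivalence is about the RETURN value.

-- ===== PORT A =====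
-- A's while-loop over index i, as the obvious recursion on the remaining suffix
-- (i += k becomes dropping k consumed characters).
def convertAuxA : List Char → List Char
  | [] => []
  | c :: rest =>
    if c = '\\' then
      match rest with
      | [] => []          -- Python: s[i+1] raises IndexError here (outside Pre_)
      | d :: rest' =>
        if d = 'x' then '-' :: convertAuxA (rest'.drop 2)   -- i += 4
        else d :: convertAuxA rest'                          -- i += 2
    else c :: convertAuxA rest                               -- i += 1
  termination_by l => l.length
  decreasing_by all_goals (simp; try omega)

def convert (s : String) : String := String.ofList (convertAuxA s.toList)

-- ===== PORT B =====
-- Source B's loop on the remaining string `rest`: find the next backslash, emit the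
-- run before it as one slice, handle the escape, continue on the sliced tail.
def convertAuxB (l : List Char) : List Char :=
  match hj : PySem.Chars.find l ['\\'] with
  | .negSucc _ => l                                      -- j == -1: append rest, break
  | .ofNat j =>
    l.take j ++                                          -- rest[:j]
      (match PySem.List.pyGet? l ((j : Int) + 1) with    -- rest[j+1]
       | none => []                                      -- Python raises IndexError (outside Pre_)
       | some c =>
         if c = 'x' then '-' :: convertAuxB (l.drop (j + 4))
         else c :: convertAuxB (l.drop (j + 2)))
  termination_by l.length
  decreasing_by
  all_goals
    have h0 : (0:Int) ≤ PySem.Chars.find l ['\\'] := by rw [hj]; exact Int.natCast_nonneg j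
    have hs := PySem.Chars.find_spec h0
    have hjn : (PySem.Chars.find l ['\\']).toNat = j := by rw [hj]; rfl
    rw [hjn] at hs
    rcases List.cons_prefix_iff.mp hs.1 with ⟨t, ht, -⟩
    have hne : l.drop j ≠ [] := by intro h'; rw [h'] at ht; simp at ht
    have := List.length_pos_iff.mpr hne
    simp only [List.length_drop] at this
    simp; omega
def convert_alt (s : String) : String := String.ofList (convertAuxB s.toList)

-- ===== PRECONDITION & SPEC =====
-- Pre_ excludes EXACTLY the strings on which A raises IndexError (reading s[i+1] when a
-- backslash is the last unconsumed character); B raises identically there. The condition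
-- is a 4-state character automaton ('inside/outside an escape'): A raises iff the string
-- ends in the 'just saw an escape-opening backslash' state.
inductive EscSt : Type
  | norm | esc | skip2 | skip1
  deriving DecidableEq, Repr

def escStep : EscSt → Char → EscSt
  | .norm, c => if c = '\\' then .esc else .norm
  | .esc,  c => if c = 'x' then .skip2 else .norm
  | .skip2, _ => .skip1
  | .skip1, _ => .norm

def Pre_convert (s : String) : Prop := s.toList.foldl escStep .norm ≠ .esc
instance (s : String) : Decidable (Pre_convert s) := by unfold Pre_convert; infer_instance

def pvWitness_convert : String := "a\\nb\\xFFc"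

def Spec_convert (s : String) (out : String) : Prop := out = convert_alt s
instance (s : String) (out : String) : Decidable (Spec_convert s out) := by unfold Spec_convert; infer_instance

-- ===== CLAIM (what is proved, stated in full; the proofs are below) =====
def Claim_equal_convert : Prop := ∀ (s : String), Dom_convert s → Pre_convert s → Spec_convert s (convert s)

-- ===== LEMMAS AND PROOFS =====

theorem auxA_no_bs (l : List Char) (h : '\\' ∉ l) : convertAuxA l = l := by
  induction l with
  | nil => simp [convertAuxA]
  | cons c rest ih =>
    rw [convertAuxA.eq_def]
    have hc : ¬ c = '\\' := by intro hc; exact h (hc ▸ List.mem_cons_self)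
    simp only [if_neg hc]
    rw [ih (fun hm => h (List.mem_cons_of_mem _ hm))]

theorem auxA_prefix (t m : List Char) (h : '\\' ∉ t) :
    convertAuxA (t ++ m) = t ++ convertAuxA m := by
  induction t with
  | nil => simp
  | cons c rest ih =>
    have hc : ¬ c = '\\' := by intro hc; exact h (hc ▸ List.mem_cons_self)
    rw [List.cons_append, convertAuxA.eq_def]
    simp only [if_neg hc]
    rw [ih (fun hm => h (List.mem_cons_of_mem _ hm))]
    simp

theorem foldl_norm_no_bs (t : List Char) (h : '\\' ∉ t) :
    t.foldl escStep .norm = .norm := by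
  induction t with
  | nil => rfl
  | cons c rest ih =>
    have hc : ¬ c = '\\' := by intro hc; exact h (hc ▸ List.mem_cons_self)
    simp only [List.foldl_cons, escStep, if_neg hc]
    exact ih (fun hm => h (List.mem_cons_of_mem _ hm))

theorem foldl_skip2_drop (t : List Char) (h : t.foldl escStep .skip2 ≠ .esc) :
    (t.drop 2).foldl escStep .norm ≠ .esc := by
  match t with
  | [] => simp [escStep]
  | [d] => simp [escStep]
  | d :: e :: rest =>
    simpa only [List.foldl_cons, escStep, List.drop_succ_cons, List.drop_zero] using h

theorem aux_eq (l : List Char) (h : l.foldl escStep .norm ≠ .esc) :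
    convertAuxA l = convertAuxB l := by
  rw [convertAuxB]
  split
  case _ m hj =>
    -- find < 0 : no backslash in l
    have hmem : '\\' ∉ l := by
      intro hm
      have h0 : (0:Int) ≤ PySem.Chars.find l ['\\'] :=
        (PySem.Chars.find_nonneg_iff l ['\\']).mpr ((List.singleton_infix_iff _ _).mpr hm)
      rw [hj] at h0
      exact absurd h0 (by exact of_decide_eq_false rfl |>.elim)
    exact auxA_no_bs l hmem
  case _ j hj =>
    have h0 : (0:Int) ≤ PySem.Chars.find l ['\\'] := by rw [hj]; exact Int.natCast_nonneg j
    have hs := PySem.Chars.find_spec h0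
    have hjn : (PySem.Chars.find l ['\\']).toNat = j := by rw [hj]; rfl
    rw [hjn] at hs
    rcases List.cons_prefix_iff.mp hs.1 with ⟨t, ht, -⟩
    have hlen : j < l.length := by
      have hne : l.drop j ≠ [] := by intro h'; rw [h'] at ht; simp at ht
      have := List.length_pos_iff.mpr hne
      simp only [List.length_drop] at this; omega
    have hmin : ∀ i, i < j → ¬ (['\\'] <+: l.drop i) := hs.2
    have hnb : '\\' ∉ l.take j := by
      intro hm
      rcases List.mem_iff_getElem.mp hm with ⟨i, hi, hgi⟩
      have hi' : i < j := by
        have := hi; simp only [List.length_take] at this; omega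
      apply hmin i hi'
      refine ⟨l.drop (i+1), ?_⟩
      rw [List.singleton_append, List.drop_eq_getElem_cons (by omega : i < l.length)]
      congr 1
      rw [← hgi, List.getElem_take]
    have hdrop1 : l.drop (j+1) = t := by
      have := List.drop_eq_getElem_cons (l := l) hlen
      rw [ht] at this
      exact (List.cons.injEq _ _ _ _ ▸ this.symm).2
    have hdecomp : l = l.take j ++ '\\' :: t := by
      conv_lhs => rw [← List.take_append_drop j l, ht]
    -- thread the automaton state through the decomposition
    have hfold : t.foldl escStep .esc ≠ .esc := by
      intro hc; apply h
      rw [hdecomp, List.foldl_append, foldl_norm_no_bs _ hnb]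
      simpa only [List.foldl_cons, escStep, if_pos rfl] using hc
    -- rewrite A's side through the decomposition
    conv_lhs => rw [hdecomp, auxA_prefix _ _ hnb]
    congr 1
    -- rest[j+1]
    have hget : PySem.List.pyGet? l ((j : Int) + 1) = t.head? := by
      rw [show ((j : Int) + 1) = ((j+1 : Nat) : Int) by push_cast; ring,
          PySem.List.pyGet?_natCast, ← List.head?_drop, hdrop1]
    rw [hget]
    match hT : t with
    | [] =>
      -- l ends in a dangling backslash: the automaton ends in .esc, contradicting h
      exact absurd rfl hfold
    | c :: t' =>
      have hA : convertAuxA ('\\' :: c :: t') =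
          if c = 'x' then '-' :: convertAuxA (t'.drop 2) else c :: convertAuxA t' := by
        rw [convertAuxA.eq_def]; simp
      rw [hA]
      have hd2 : l.drop (j+2) = t' := by
        have h1 : (l.drop (j+1)).drop 1 = l.drop (j+2) := by
          rw [List.drop_drop]
        rw [← h1, hdrop1]; rfl
      have hd4 : l.drop (j+4) = t'.drop 2 := by
        have h1 : (l.drop (j+2)).drop 2 = l.drop (j+4) := by
          rw [List.drop_drop]
        rw [← h1, hd2]
      simp only [List.head?_cons]
      by_cases hc : c = 'x'
      · simp only [if_pos hc]
        have hpre' : (t'.drop 2).foldl escStep .norm ≠ .esc := by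
          apply foldl_skip2_drop
          simpa only [List.foldl_cons, escStep, if_pos hc] using hfold
        rw [hd4.symm]
        congr 1
        exact aux_eq _ (hd4 ▸ hpre')
      · simp only [if_neg hc]
        have hpre' : t'.foldl escStep .norm ≠ .esc := by
          simpa only [List.foldl_cons, escStep, if_neg hc] using hfold
        rw [hd2.symm]
        congr 1
        exact aux_eq _ (hd2 ▸ hpre')
  termination_by l.length
  decreasing_by
  all_goals
    have hll := congrArg List.length hdecomp
    simp at hll ⊢
    omega

-- ===== VERDICT (by name: the statement is the Claim_ definition above) =====
theorem convert_spec : Claim_equal_convert := by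
  intro s _ hpre
  unfold Spec_convert convert convert_alt
  exact congrArg _ (aux_eq _ hpre)
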